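-- pv_equiv track=rewrite | github.com/shafiur01/CompetitiveProgramming | Algorithm/Programming_Language/aetg03.py | create_m_set
-- ===== SOURCE A (Python) =====
-- def create_m_set(start_level):
--     current = 0
--     count = 0
--     the_set = []
--     temp_level = start_level  # created to prevent loss of information on the input variable
--     while temp_level > 1:
--         the_set.append([])
--         # we iterate until the final fa
--         for j in range(temp_level):
--             the_set[count].append(current)
--             current += 1
--         count += 1
--         temp_level -= 1
--     # print (the_set[count-1])
--     return the_set
-- ===== SOURCE B (Python) =====
-- def create_m_set(start_level):
--     # each row i (0-based) starts at the triangular offset i*start_level - i*(i-1)//2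
--     # and has length start_level - i; rows go down to length 2.
--     return [list(range(i * start_level - i * (i - 1) // 2,
--                        i * start_level - i * (i - 1) // 2 + start_level - i))
--             for i in range(start_level - 1)]
-- ===== Notes on version B (the rewrite author's own statement) =====
-- stated objective: alternative
-- what changed: Replaced the while-loop that threads a running `current` counter and a `count` index across rows by an index-based comprehension in which each row is computed independently from a closed-form triangular offset i*start_level - i*(i-1)//2.
import Mathlib
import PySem

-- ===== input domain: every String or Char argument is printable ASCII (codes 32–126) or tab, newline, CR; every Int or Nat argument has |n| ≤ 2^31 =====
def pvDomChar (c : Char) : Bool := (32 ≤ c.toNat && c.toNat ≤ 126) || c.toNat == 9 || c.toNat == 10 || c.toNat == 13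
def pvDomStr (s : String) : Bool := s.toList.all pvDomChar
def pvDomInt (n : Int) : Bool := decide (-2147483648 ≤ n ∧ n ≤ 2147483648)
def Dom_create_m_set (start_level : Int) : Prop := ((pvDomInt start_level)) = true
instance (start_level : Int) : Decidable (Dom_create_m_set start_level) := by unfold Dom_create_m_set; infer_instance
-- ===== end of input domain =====

-- B replaces A's threaded `current`/`count` accumulators with independent rows computed
-- from a closed-form triangular offset (objective: alternative decomposition, same cost).

-- ===== PORT A =====
-- the_set[count].append(current): rebuild the list with row `count` extended in place
def pvAppendAt : List (List Int) → Nat → Int → List (List Int)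
  | [], _, _ => []
  | r :: rest, 0, v => (r ++ [v]) :: rest
  | r :: rest, n+1, v => r :: pvAppendAt rest n v

-- the while loop of A: state (temp_level, current, count, the_set)
def create_m_set_loop (temp_level current count : Int) (the_set : List (List Int)) :
    List (List Int) :=
  if temp_level > 1 then
    -- the_set.append([])
    let s1 := the_set ++ [([] : List Int)]
    -- for j in range(temp_level): the_set[count].append(current); current += 1
    let st := (PySem.List.pyRange 0 temp_level 1).foldl
      (fun (p : List (List Int) × Int) _ =>
        (pvAppendAt p.1 count.toNat p.2, p.2 + 1))
      (s1, current)
    create_m_set_loop (temp_level - 1) st.2 (count + 1) st.1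
  else the_set
termination_by temp_level.toNat
decreasing_by omega

def create_m_set (start_level : Int) : List (List Int) :=
  create_m_set_loop start_level 0 0 []

-- ===== PORT B =====
def create_m_set_alt (start_level : Int) : List (List Int) :=
  (PySem.List.pyRange 0 (start_level - 1) 1).map (fun i =>
    PySem.List.pyRange
      (i * start_level - PySem.Int.floordiv (i * (i - 1)) 2)
      (i * start_level - PySem.Int.floordiv (i * (i - 1)) 2 + start_level - i) 1)

-- ===== PRECONDITION & SPEC =====
def Spec_create_m_set (start_level : Int) (out : List (List Int)) : Prop := out = create_m_set_alt start_level
instance (start_level : Int) (out : List (List Int)) : Decidable (Spec_create_m_set start_level out) := by unfold Spec_create_m_set; infer_instance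

-- ===== CLAIM (what is proved, stated in full; the proofs are below) =====
def Claim_equal_create_m_set : Prop := ∀ (start_level : Int), Dom_create_m_set start_level → Spec_create_m_set start_level (create_m_set start_level)

-- ===== LEMMAS AND PROOFS =====

-- the rows A produces, starting counter c, with remaining temp_level n (lengths n, n-1, …, 2)
def pvRows : Nat → Int → List (List Int)
  | 0, _ => []
  | 1, _ => []
  | (n+2), c =>
      PySem.List.pyRange c (c + ((n:Int)+2)) 1 :: pvRows (n+1) (c + ((n:Int)+2))

theorem pv_appendAt_last (s : List (List Int)) (r : List Int) (v : Int) :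
    pvAppendAt (s ++ [r]) s.length v = s ++ [r ++ [v]] := by
  induction s with
  | nil => rfl
  | cons a s ih => simpa [pvAppendAt] using ih

-- the inner for-loop: appends c, c+1, … to the last row
theorem pv_inner (l : List Int) (s : List (List Int)) (r : List Int) (c : Int) :
    l.foldl
      (fun (p : List (List Int) × Int) _ =>
        (pvAppendAt p.1 s.length p.2, p.2 + 1))
      (s ++ [r], c)
    = (s ++ [r ++ PySem.List.pyRange c (c + l.length) 1], c + l.length) := by
  induction l generalizing r c with
  | nil => simp [PySem.List.pyRange_one_eq_nil]
  | cons x l ih =>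
      simp only [List.foldl_cons, pv_appendAt_last]
      rw [ih (r ++ [c]) (c + 1)]
      have h1 : c < c + ((l.length : Int) + 1) := by
        have : (0:Int) ≤ l.length := Int.natCast_nonneg _
        omega
      rw [show (((x :: l).length : Int)) = ((l.length : Int) + 1) by simp]
      rw [PySem.List.pyRange_one_cons h1]
      simp only [Prod.mk.injEq]
      refine ⟨?_, by omega⟩
      rw [show c + 1 + (l.length : Int) = c + ((l.length : Int) + 1) by omega]
      simp

theorem pv_loop (n : Nat) : ∀ (t c : Int) (s : List (List Int)), t.toNat = n →
    create_m_set_loop t c (s.length : Int) s = s ++ pvRows n c := by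
  induction n with
  | zero =>
      intro t c s ht
      rw [create_m_set_loop]
      simp only [if_neg (by omega : ¬ t > 1)]
      simp [pvRows]
  | succ n ih =>
      intro t c s ht
      match n, ih with
      | 0, _ =>
          rw [create_m_set_loop]
          simp only [if_neg (by omega : ¬ t > 1)]
          simp [pvRows]
      | Nat.succ m, ih =>
          have htpos : t > 1 := by omega
          have htv : t = ((m:Int) + 2) := by omega
          rw [create_m_set_loop, if_pos htpos]
          have hlen : ((PySem.List.pyRange 0 t 1).length : Int) = t := by
            rw [PySem.List.length_pyRange_one]; omega
          have hnat : (s.length : Int).toNat = s.length := by simp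
          simp only [hnat]
          rw [pv_inner (PySem.List.pyRange 0 t 1) s [] c]
          simp only [List.nil_append, hlen]
          have hs' : ((s.length : Int) + 1)
              = (((s ++ [PySem.List.pyRange c (c + t) 1]).length : Int)) := by
            simp
          rw [hs', ih (t - 1) (c + t) (s ++ [PySem.List.pyRange c (c + t) 1]) (by omega)]
          rw [htv]
          show s ++ [PySem.List.pyRange c (c + ((m:Int)+2)) 1] ++ pvRows (m+1) (c + ((m:Int)+2))
              = s ++ (PySem.List.pyRange c (c + ((m:Int)+2)) 1 :: pvRows (m+1) (c + ((m:Int)+2)))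
          rw [List.append_assoc]
          rfl

-- triangular numbers: T(j+1) = T(j) + j for j ≥ 0 (with Python floor division)
theorem pv_tri (j : Int) :
    PySem.Int.floordiv ((j + 1) * j) 2 = PySem.Int.floordiv (j * (j - 1)) 2 + j := by
  rw [PySem.Int.floordiv_eq_ediv_of_pos (by norm_num),
      PySem.Int.floordiv_eq_ediv_of_pos (by norm_num)]
  have h : (j + 1) * j = j * (j - 1) + j * 2 := by ring
  rw [h, Int.add_mul_ediv_right _ _ (by norm_num)]

-- A's rows as B's closed-form map
theorem pv_rows_map (n : Nat) : ∀ (c : Int),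
    pvRows n c
      = (PySem.List.pyRange 0 ((n:Int) - 1) 1).map (fun i =>
          PySem.List.pyRange
            (c + i * (n:Int) - PySem.Int.floordiv (i * (i - 1)) 2)
            (c + i * (n:Int) - PySem.Int.floordiv (i * (i - 1)) 2 + (n:Int) - i) 1) := by
  induction n with
  | zero => intro c; simp [pvRows, PySem.List.pyRange_one_eq_nil]
  | succ n ih =>
      intro c
      match n, ih with
      | 0, _ => simp [pvRows, PySem.List.pyRange_one_eq_nil]
      | Nat.succ m, ih =>
          have hN : ((m:Int) + 2) = ((Nat.succ m + 1 : Nat) : Int) := by push_cast; omega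
          rw [pvRows, ih (c + ((m:Int)+2))]
          have hcons : (0:Int) < ((Nat.succ m + 1 : Nat) : Int) - 1 := by push_cast; omega
          rw [PySem.List.pyRange_one_cons hcons, List.map_cons]
          congr 1
          · have h0 : PySem.Int.floordiv ((0:Int) * (0 - 1)) 2 = 0 := by decide
            simp only [h0]
            push_cast
            ring_nf
          · -- shift the index: j-th row of the tail is the (j+1)-st row overall
            rw [PySem.List.pyRange_one, PySem.List.pyRange_one]
            have hlen : (((Nat.succ m + 1 : Nat) : Int) - 1 - (0 + 1)).toNat
                = (((Nat.succ m : Nat) : Int) - 1 - 0).toNat := by push_cast; omega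
            rw [hlen, List.map_map, List.map_map]
            apply List.map_congr_left
            intro k _
            simp only [Function.comp]
            have hT := pv_tri (k : Int)
            have h1 : (0:Int) + 1 + (k:Int) = ((k:Int) + 1) := by ring
            rw [h1]
            have h2 : ((k:Int) + 1) * ((k:Int) + 1 - 1) = ((k:Int) + 1) * (k:Int) := by ring
            rw [h2, hT]
            push_cast
            ring_nf

-- ===== VERDICT (by name: the statement is the Claim_ definition above) =====
theorem create_m_set_spec : Claim_equal_create_m_set := by
  intro start_level _
  unfold Spec_create_m_set create_m_set create_m_set_alt
  rw [show create_m_set_loop start_level 0 0 []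
        = create_m_set_loop start_level 0 (([] : List (List Int)).length : Int) [] by
      simp]
  rw [pv_loop start_level.toNat start_level 0 [] rfl, List.nil_append,
      pv_rows_map start_level.toNat 0]
  by_cases h : start_level ≤ 1
  · have ha : (start_level.toNat : Int) - 1 ≤ 0 := by omega
    rw [PySem.List.pyRange_one_eq_nil ha, PySem.List.pyRange_one_eq_nil (by omega)]
    simp
  · have hc : (start_level.toNat : Int) = start_level := by omega
    rw [hc]
    apply List.map_congr_left
    intro i _
    ring_nf
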